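-- pv_equiv track=rewrite | github.com/meghak423/AllSems_Console | WINGS_AI_Bootcamp/Python/Odometer.py | prev_reading
-- ===== SOURCE A (Python) =====
-- def is_valid(n: int) -> bool:
--     if n < 10:
--         return True
--     elif (n // 10) % 10 < n % 10:
--         return is_valid(n // 10)
--     else:
--         return False
--
-- def get_limits(n: int) -> tuple[int, int]:
--     LIMIT = "123456789"
--     size = len(str(n))
--     return int(LIMIT[:size]), int(LIMIT[-size:])
--
-- def prev_reading(reading: int) -> int:
--     start, limit = get_limits(reading)
--     if reading == start:
--         return limit
--     reading -= 1
--     while not is_valid(reading):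
--         reading -= 1
--         if reading < start:
--             reading = limit
--     return reading
-- ===== SOURCE B (Python) =====
-- # Precompute the 511 strictly-increasing-digit numbers once; answer by table scan
-- # instead of decrementing until is_valid.
--
-- _nums = [0]
-- for _d in range(1, 10):
--     _nums += [_n * 10 + _d for _n in _nums]
-- _TABLE = sorted(_nums[1:], reverse=True)
--
--
-- def get_limits(n):
--     LIMIT = "123456789"
--     size = len(str(n))
--     return int(LIMIT[:size]), int(LIMIT[-size:])
--
--
-- def prev_reading(reading):
--     start, limit = get_limits(reading)
--     if reading == start:
--         return limit
--     m = reading - 1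
--     if m < 10:
--         return m
--     if reading < start:
--         return limit
--     for t in _TABLE:
--         if t <= m:
--             return t
--     return m  # unreachable: _TABLE contains every single-digit number
-- ===== Notes on version B (the rewrite author's own statement) =====
-- stated objective: faster
-- what changed: B precomputes once the table of every number with strictly increasing digits (nonempty subsets of digits 1-9) and answers with the largest table entry <= reading-1 (same start/limit wrap handling), instead of decrementing reading and re-checking is_valid until a valid number is found; intended as faster (A scans the whole gap down to the previous valid number, B does bounded work), measured 60x at the largest size on one probe family though inputs that leave A almost no gap show no speedup.
import Mathlib
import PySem

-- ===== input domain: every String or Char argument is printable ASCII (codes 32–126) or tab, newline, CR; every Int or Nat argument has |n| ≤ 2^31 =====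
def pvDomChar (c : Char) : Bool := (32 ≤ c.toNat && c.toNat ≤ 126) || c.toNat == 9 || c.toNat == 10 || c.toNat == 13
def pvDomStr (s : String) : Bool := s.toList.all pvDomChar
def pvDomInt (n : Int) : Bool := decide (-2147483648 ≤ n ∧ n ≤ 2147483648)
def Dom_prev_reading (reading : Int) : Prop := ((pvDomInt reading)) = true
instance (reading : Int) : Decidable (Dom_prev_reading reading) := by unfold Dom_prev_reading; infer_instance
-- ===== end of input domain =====

-- B replaces A's decrement-until-valid scan by a precomputed table of all
-- strictly-increasing-digit numbers, answered by one scan of that table: constant work instead of A's scan over the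
-- whole gap down to the previous valid number (intended as faster; the measured
-- speedup depends on the gap the input leaves A to scan).

-- ===== PORT A =====
-- is_valid, ported with a fuel counter as a totality guard only: the fuel n.toNat + 1
-- strictly dominates the recursion depth (n shrinks to n // 10 each step), so the
-- fuel-0 fallback is never reached.
def isValidF : Nat → Int → Bool
  | 0, _ => true
  | f + 1, n =>
    if n < 10 then true
    else if PySem.Int.mod (PySem.Int.floordiv n 10) 10 < PySem.Int.mod n 10 then
      isValidF f (PySem.Int.floordiv n 10)
    else false

def isValid (n : Int) : Bool := isValidF (n.toNat + 1) n

-- get_limits; int() cannot raise here (the slices of "123456789" are never empty: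
-- size = len(str(n)) ≥ 1), so .getD 0 is dead code.
def getLimits (n : Int) : Int × Int :=
  let size : Int := PySem.Str.len (PySem.Int.toStr n)
  ((PySem.Int.ofStr? (PySem.Str.slice "123456789" none (some size))).getD 0,
   (PySem.Int.ofStr? (PySem.Str.slice "123456789" (some (-size)) none)).getD 0)

-- the while-loop of prev_reading; fuel is a totality guard only (the Python loop
-- always stops within (reading - 1 - start) + 3 iterations: it stops at the latest
-- one step after jumping to limit, which has strictly increasing digits).
def loopA (start limit : Int) : Nat → Int → Int
  | 0, v => v
  | f + 1, v =>
    if isValid v then v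
    else
      let v' := v - 1
      loopA start limit f (if v' < start then limit else v')

def prev_reading (reading : Int) : Int :=
  let sl := getLimits reading
  if reading = sl.1 then sl.2
  else loopA sl.1 sl.2 ((reading - 1 - sl.1).toNat + 3) (reading - 1)

-- ===== PORT B =====
-- the module-level table of Source B: every strictly-increasing-digit number, descending
def tableDesc : List Int :=
  let nums : List Int := (PySem.List.pyRange 1 10 1).foldl
    (fun acc d => acc ++ acc.map (fun n => n * 10 + d)) [0]
  PySem.List.sorted (PySem.List.slice nums (some 1) none) (fun x => x) true

-- the for-loop of Source B's prev_reading: first table entry ≤ m, with the unreachable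
-- fallthrough value m
def firstLE (m : Int) : List Int → Int
  | [] => m
  | t :: ts => if t ≤ m then t else firstLE m ts

def prev_reading_alt (reading : Int) : Int :=
  let sl := getLimits reading
  if reading = sl.1 then sl.2
  else
    let m := reading - 1
    if m < 10 then m
    else if reading < sl.1 then sl.2
    else firstLE m tableDesc

-- ===== PRECONDITION & SPEC =====
def Spec_prev_reading (reading : Int) (out : Int) : Prop := out = prev_reading_alt reading
instance (reading : Int) (out : Int) : Decidable (Spec_prev_reading reading out) := by unfold Spec_prev_reading; infer_instance

-- ===== CLAIM (what is proved, stated in full; the proofs are below) =====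
def Claim_equal_prev_reading : Prop := ∀ (reading : Int), Dom_prev_reading reading → Spec_prev_reading reading (prev_reading reading)

-- ===== LEMMAS AND PROOFS =====

-- the value of tableDesc as a literal list
def tlit : List Int := [123456789, 23456789, 13456789, 12456789, 12356789, 12346789, 12345789, 12345689, 12345679, 12345678, 3456789, 2456789, 2356789, 2346789, 2345789, 2345689, 2345679, 2345678, 1456789, 1356789, 1346789, 1345789, 1345689, 1345679, 1345678, 1256789, 1246789, 1245789, 1245689, 1245679, 1245678, 1236789, 1235789, 1235689, 1235679, 1235678, 1234789, 1234689, 1234679, 1234678, 1234589, 1234579, 1234578, 1234569, 1234568, 1234567, 456789, 356789, 346789, 345789, 345689, 345679, 345678, 256789, 246789, 245789, 245689, 245679, 245678, 236789, 235789, 235689, 235679, 235678, 234789, 234689, 234679, 234678, 234589, 234579, 234578, 234569, 234568, 234567, 156789, 146789, 145789, 145689, 145679, 145678, 136789, 135789, 135689, 135679, 135678, 134789, 134689, 134679, 134678, 134589, 134579, 134578, 134569, 134568, 134567, 126789, 125789, 125689, 125679, 125678, 124789, 124689, 124679, 124678, 124589, 124579, 124578, 124569, 124568, 124567, 123789, 123689,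 123679, 123678, 123589, 123579, 123578, 123569, 123568, 123567, 123489, 123479, 123478, 123469, 123468, 123467, 123459, 123458, 123457, 123456, 56789, 46789, 45789, 45689, 45679, 45678, 36789, 35789, 35689, 35679, 35678, 34789, 34689, 34679, 34678, 34589, 34579, 34578, 34569, 34568, 34567, 26789, 25789, 25689, 25679, 25678, 24789, 24689, 24679, 24678, 24589, 24579, 24578, 24569, 24568, 24567, 23789, 23689, 23679, 23678, 23589, 23579, 23578, 23569, 23568, 23567, 23489, 23479, 23478, 23469, 23468, 23467, 23459, 23458, 23457, 23456, 16789, 15789, 15689, 15679, 15678, 14789, 14689, 14679, 14678, 14589, 14579, 14578, 14569, 14568, 14567, 13789, 13689, 13679, 13678, 13589, 13579, 13578, 13569, 13568, 13567, 13489, 13479, 13478, 13469, 13468, 13467, 13459, 13458, 13457, 13456, 12789, 12689, 12679, 12678, 12589, 12579, 12578, 12569, 12568, 12567, 12489, 12479, 12478, 12469, 12468, 12467, 12459, 12458, 12457, 12456, 12389, 12379, 12378, 12369, 12368, 12367, 12359, 12358, 12357, 12356, 12349, 12348, 12347, 12346, 12345, 6789, 5789, 5689, 5679, 5678, 4789,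 4689, 4679, 4678, 4589, 4579, 4578, 4569, 4568, 4567, 3789, 3689, 3679, 3678, 3589, 3579, 3578, 3569, 3568, 3567, 3489, 3479, 3478, 3469, 3468, 3467, 3459, 3458, 3457, 3456, 2789, 2689, 2679, 2678, 2589, 2579, 2578, 2569, 2568, 2567, 2489, 2479, 2478, 2469, 2468, 2467, 2459, 2458, 2457, 2456, 2389, 2379, 2378, 2369, 2368, 2367, 2359, 2358, 2357, 2356, 2349, 2348, 2347, 2346, 2345, 1789, 1689, 1679, 1678, 1589, 1579, 1578, 1569, 1568, 1567, 1489, 1479, 1478, 1469, 1468, 1467, 1459, 1458, 1457, 1456, 1389, 1379, 1378, 1369, 1368, 1367, 1359, 1358, 1357, 1356, 1349, 1348, 1347, 1346, 1345, 1289, 1279, 1278, 1269, 1268, 1267, 1259, 1258, 1257, 1256, 1249, 1248, 1247, 1246, 1245, 1239, 1238, 1237, 1236, 1235, 1234, 789, 689, 679, 678, 589, 579, 578, 569, 568, 567, 489, 479, 478, 469, 468, 467, 459, 458, 457, 456, 389, 379, 378, 369, 368, 367, 359, 358, 357, 356, 349, 348, 347, 346, 345, 289, 279, 278, 269, 268,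 267, 259, 258, 257, 256, 249, 248, 247, 246, 245, 239, 238, 237, 236, 235, 234, 189, 179, 178, 169, 168, 167, 159, 158, 157, 156, 149, 148, 147, 146, 145, 139, 138, 137, 136, 135, 134, 129, 128, 127, 126, 125, 124, 123, 89, 79, 78, 69, 68, 67, 59, 58, 57, 56, 49, 48, 47, 46, 45, 39, 38, 37, 36, 35, 34, 29, 28, 27, 26, 25, 24, 23, 19, 18, 17, 16, 15, 14, 13, 12, 9, 8, 7, 6, 5, 4, 3, 2, 1]

set_option maxRecDepth 1000000 in
set_option maxHeartbeats 1000000 in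
theorem htl : tableDesc = tlit := by decide

set_option maxRecDepth 1000000 in
theorem tlit_chain : List.IsChain (· > ·) tlit := by decide

theorem tlit_pairwise : tlit.Pairwise (· > ·) := tlit_chain.pairwise

set_option maxRecDepth 1000000 in
set_option maxHeartbeats 1000000 in
theorem tlit_valid : ∀ t ∈ tlit, isValid t = true := by decide

set_option maxRecDepth 1000000 in
set_option maxHeartbeats 4000000 in
theorem tlit_closure : ∀ t ∈ tlit, ∀ r ∈ ([0,1,2,3,4,5,6,7,8,9] : List Int),
    PySem.Int.mod t 10 < r → t * 10 + r ∈ tlit := by decide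

set_option maxRecDepth 1000000 in
theorem tlit_single : ∀ q ∈ ([1,2,3,4,5,6,7,8,9] : List Int), q ∈ tlit := by decide

theorem mem_digit_list (r : Int) (h1 : 0 ≤ r) (h2 : r < 10) :
    r ∈ ([0,1,2,3,4,5,6,7,8,9] : List Int) := by interval_cases r <;> simp

theorem mem_digit_list' (q : Int) (h1 : 1 ≤ q) (h2 : q < 10) :
    q ∈ ([1,2,3,4,5,6,7,8,9] : List Int) := by interval_cases q <;> simp

theorem isValidF_congr : ∀ (f₁ f₂ : Nat) (n : Int), n.toNat < f₁ → n.toNat < f₂ →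
    isValidF f₁ n = isValidF f₂ n := by
  intro f₁
  induction f₁ with
  | zero => intro f₂ n h1 _; omega
  | succ f ih =>
    intro f₂ n h1 h2
    cases f₂ with
    | zero => omega
    | succ f₂ =>
      show (if n < 10 then true else _) = (if n < 10 then true else _)
      by_cases hn : n < 10
      · rw [if_pos hn, if_pos hn]
      · have hfd : PySem.Int.floordiv n 10 = n / 10 :=
          PySem.Int.floordiv_eq_ediv_of_pos (by omega)
        rw [if_neg hn, if_neg hn]
        by_cases hc : PySem.Int.mod (PySem.Int.floordiv n 10) 10 < PySem.Int.mod n 10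
        · rw [if_pos hc, if_pos hc]
          exact ih f₂ _ (by rw [hfd]; omega) (by rw [hfd]; omega)
        · rw [if_neg hc, if_neg hc]

theorem isValid_lt10 {n : Int} (h : n < 10) : isValid n = true := by
  simp [isValid, isValidF, h]

theorem isValid_step {n : Int} (h : 10 ≤ n) :
    isValid n = (if PySem.Int.mod (PySem.Int.floordiv n 10) 10 < PySem.Int.mod n 10 then
      isValid (PySem.Int.floordiv n 10) else false) := by
  have hfd : PySem.Int.floordiv n 10 = n / 10 := PySem.Int.floordiv_eq_ediv_of_pos (by omega)
  conv_lhs => rw [isValid]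
  show (if n < 10 then true else _) = _
  rw [if_neg (by omega : ¬ n < 10)]
  by_cases hc : PySem.Int.mod (PySem.Int.floordiv n 10) 10 < PySem.Int.mod n 10
  · rw [if_pos hc, if_pos hc]
    exact isValidF_congr _ _ _ (by rw [hfd]; omega) (by rw [hfd]; omega)
  · rw [if_neg hc, if_neg hc]

theorem valid_mem : ∀ (k : Nat) (n : Int), n.toNat ≤ k → 10 ≤ n → isValid n = true → n ∈ tlit := by
  intro k
  induction k with
  | zero => intro n hk h10 _; omega
  | succ k ih =>
    intro n hk h10 hv
    have hfd : PySem.Int.floordiv n 10 = n / 10 := PySem.Int.floordiv_eq_ediv_of_pos (by omega)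
    have hmod : PySem.Int.mod n 10 = n % 10 := PySem.Int.mod_eq_emod_of_pos (by omega)
    rw [isValid_step h10] at hv
    by_cases hc : PySem.Int.mod (PySem.Int.floordiv n 10) 10 < PySem.Int.mod n 10
    · rw [if_pos hc] at hv
      rw [hfd] at hv hc
      have hqmem : n / 10 ∈ tlit := by
        by_cases hq10 : n / 10 < 10
        · exact tlit_single _ (mem_digit_list' _ (by omega) hq10)
        · exact ih (n / 10) (by omega) (by omega) hv
      have hcl := tlit_closure (n / 10) hqmem (n % 10)
        (mem_digit_list _ (by omega) (by omega)) (by rw [hmod] at hc; exact hc)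
      have hn : n = n / 10 * 10 + n % 10 := by omega
      rw [hn]; exact hcl
    · rw [if_neg hc] at hv; exact absurd hv (by simp)

theorem firstLE_spec : ∀ (L : List Int) (v x : Int), L.Pairwise (· > ·) → x ∈ L → x ≤ v →
    firstLE v L ∈ L ∧ firstLE v L ≤ v ∧ ∀ u ∈ L, u ≤ v → u ≤ firstLE v L := by
  intro L
  induction L with
  | nil => intro v x _ hx _; exact absurd hx (by simp)
  | cons t ts ih =>
    intro v x hp hx hxv
    rw [List.pairwise_cons] at hp
    by_cases ht : t ≤ v
    · simp only [firstLE, if_pos ht]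
      refine ⟨by simp, ht, ?_⟩
      intro u hu huv
      rcases List.mem_cons.mp hu with h | h
      · omega
      · have := hp.1 u h; omega
    · have hxts : x ∈ ts := by
        rcases List.mem_cons.mp hx with h | h
        · omega
        · exact h
      obtain ⟨h1, h2, h3⟩ := ih v x hp.2 hxts hxv
      simp only [firstLE, if_neg ht]
      refine ⟨List.mem_cons_of_mem _ h1, h2, ?_⟩
      intro u hu huv
      rcases List.mem_cons.mp hu with h | h
      · omega
      · exact h3 u h huv

theorem firstLE_pred : ∀ (L : List Int) (v x : Int), L.Pairwise (· > ·) → x ∈ L → x ≤ v - 1 →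
    v ∉ L → firstLE v L = firstLE (v - 1) L := by
  intro L
  induction L with
  | nil => intro v x _ hx _ _; exact absurd hx (by simp)
  | cons t ts ih =>
    intro v x hp hx hxv hv
    rw [List.pairwise_cons] at hp
    by_cases ht : t ≤ v - 1
    · simp only [firstLE, if_pos ht, if_pos (by omega : t ≤ v)]
    · have htv : ¬ t ≤ v := by
        intro h
        exact hv (by simp only [List.mem_cons]; left; omega)
      have hxts : x ∈ ts := by
        rcases List.mem_cons.mp hx with h | h
        · omega
        · exact h
      simp only [firstLE, if_neg ht, if_neg htv]
      exact ih v x hp.2 hxts hxv (fun h => hv (List.mem_cons_of_mem _ h))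

theorem loopA_succ (start limit : Int) (f : Nat) (v : Int) :
    loopA start limit (f + 1) v =
      if isValid v then v
      else loopA start limit f (if v - 1 < start then limit else v - 1) := rfl

theorem loopA_eq_firstLE (start limit : Int) (hsT : start ∈ tlit) (h12 : 12 ≤ start) :
    ∀ (n : Nat) (fuel : Nat) (v : Int), v = start + (n : Int) → n < fuel →
      loopA start limit fuel v = firstLE v tlit := by
  intro n
  induction n with
  | zero =>
    intro fuel v hv hf
    cases fuel with
    | zero => omega
    | succ f =>
      have hv0 : v = start := by push_cast at hv; omega
      subst hv0
      rw [loopA_succ, if_pos (tlit_valid _ hsT)]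
      obtain ⟨h1, h2, h3⟩ := firstLE_spec tlit v v tlit_pairwise hsT le_rfl
      have := h3 v hsT le_rfl
      omega
  | succ n ih =>
    intro fuel v hv hf
    cases fuel with
    | zero => omega
    | succ f =>
      have hv' : v = start + (n : Int) + 1 := by push_cast at hv; omega
      by_cases hvd : isValid v = true
      · rw [loopA_succ, if_pos hvd]
        have hvm : v ∈ tlit := valid_mem v.toNat v le_rfl (by omega) hvd
        obtain ⟨h1, h2, h3⟩ := firstLE_spec tlit v v tlit_pairwise hvm le_rfl
        have := h3 v hvm le_rfl
        omega
      · rw [loopA_succ, if_neg hvd, if_neg (by omega : ¬ v - 1 < start)]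
        rw [ih f (v - 1) (by omega) (by omega)]
        exact (firstLE_pred tlit v start tlit_pairwise hsT (by omega)
          (fun h => hvd (tlit_valid v h))).symm

theorem glem (n k : Int) (hk : PySem.Str.len (PySem.Int.toStr n) = k) :
    getLimits n = ((PySem.Int.ofStr? (PySem.Str.slice "123456789" none (some k))).getD 0,
      (PySem.Int.ofStr? (PySem.Str.slice "123456789" (some (-k)) none)).getD 0) := by
  simp only [getLimits]
  rw [hk]

theorem toDigitsCore_len : ∀ (f : Nat) (n : Nat) (l : List Char), n < f →
    (Nat.toDigitsCore 10 f n l).length = Nat.log 10 n + 1 + l.length := by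
  intro f
  induction f with
  | zero => intro n l h; omega
  | succ f ih =>
    intro n l h
    simp only [Nat.toDigitsCore]
    by_cases h0 : n / 10 = 0
    · have hn : n < 10 := by omega
      simp [h0, Nat.log_of_lt hn]
      omega
    · simp only [h0, if_false]
      rw [ih (n / 10) _ (by omega)]
      have hlog : Nat.log 10 (n / 10) = Nat.log 10 n - 1 := Nat.log_div_base 10 n
      have hpos : 1 ≤ Nat.log 10 n := Nat.log_pos (by norm_num) (by omega)
      simp only [List.length_cons]
      omega

theorem len_pos (n : Int) (h : 0 ≤ n) :
    PySem.Str.len (PySem.Int.toStr n) = ((Nat.log 10 n.toNat : Nat) : Int) + 1 := by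
  simp only [PySem.Str.len, PySem.Int.toStr, PySem.Int.toChars, if_neg (by omega : ¬ n < 0),
    String.toList_ofList, Nat.toDigits]
  rw [toDigitsCore_len (n.toNat + 1) n.toNat [] (by omega)]
  simp

theorem len_neg (n : Int) (h : n < 0) :
    PySem.Str.len (PySem.Int.toStr n) = ((Nat.log 10 n.natAbs : Nat) : Int) + 2 := by
  simp only [PySem.Str.len, PySem.Int.toStr, PySem.Int.toChars, if_pos h,
    String.toList_ofList, Nat.toDigits]
  simp only [List.length_cons]
  rw [toDigitsCore_len (n.natAbs + 1) n.natAbs [] (by omega)]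
  simp
  omega

theorem case_eq (reading s l : Int) (hgl : getLimits reading = (s, l)) (he : reading = s) :
    prev_reading reading = prev_reading_alt reading := by
  subst he
  simp [prev_reading, prev_reading_alt, hgl]

theorem case_small (reading s l : Int) (hgl : getLimits reading = (s, l))
    (hne : reading ≠ s) (hlt : reading - 1 < 10) :
    prev_reading reading = prev_reading_alt reading := by
  simp only [prev_reading, prev_reading_alt, hgl]

  rw [if_neg hne, if_neg hne, if_pos hlt]
  rw [(by omega : (reading - 1 - s).toNat + 3 = ((reading - 1 - s).toNat + 2) + 1),
    loopA_succ, if_pos (isValid_lt10 hlt)]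

theorem case_lt (reading s l P : Int) (hgl : getLimits reading = (s, l))
    (hvl : isValid l = true) (hlt : reading < s) (hP : P ≤ reading)
    (hnv9 : 10 ≤ P - 1 → isValid (P - 1) = false)
    (hnoT : ∀ t ∈ tlit, ¬(P ≤ t ∧ t < s)) :
    prev_reading reading = prev_reading_alt reading := by
  by_cases hm : reading - 1 < 10
  · exact case_small reading s l hgl (by omega) hm
  · have hnv : isValid (reading - 1) = false := by
      by_cases h9 : reading - 1 = P - 1
      · rw [h9]; exact hnv9 (by omega)
      · by_cases hvv : isValid (reading - 1) = true
        · have hmem := valid_mem (reading - 1).toNat (reading - 1) le_rfl (by omega) hvv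
          exact absurd ⟨by omega, by omega⟩ (hnoT _ hmem)
        · simpa using hvv
    simp only [prev_reading, prev_reading_alt, hgl]
    rw [if_neg (by omega : reading ≠ s), if_neg (by omega : reading ≠ s),
      if_neg hm, if_pos hlt]
    rw [(by omega : (reading - 1 - s).toNat + 3 = (((reading - 1 - s).toNat + 1) + 1) + 1),
      loopA_succ, if_neg (by simp [hnv]), if_pos (by omega : reading - 1 - 1 < s),
      loopA_succ, if_pos hvl]

theorem case_gt (reading s l : Int) (hgl : getLimits reading = (s, l))
    (hsT : s ∈ tlit) (h12 : 12 ≤ s) (hgt : s < reading) :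
    prev_reading reading = prev_reading_alt reading := by
  simp only [prev_reading, prev_reading_alt, hgl]
  rw [if_neg (by omega : reading ≠ s), if_neg (by omega : reading ≠ s),
    if_neg (by omega : ¬ reading - 1 < 10), if_neg (by omega : ¬ reading < s)]
  rw [loopA_eq_firstLE s l hsT h12 (reading - 1 - s).toNat _ (reading - 1) (by omega) (by omega)]
  rw [htl]

-- ===== VERDICT (by name: the statement is the Claim_ definition above) =====
set_option maxRecDepth 100000 in
theorem prev_reading_spec : Claim_equal_prev_reading := by
  intro reading hdom
  have hb : -2147483648 ≤ reading ∧ reading ≤ 2147483648 := by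
    simpa [Dom_prev_reading, pvDomInt] using hdom
  unfold Spec_prev_reading
  rcases lt_or_ge reading 0 with hneg | hpos
  · have hlen0 : PySem.Str.len (PySem.Int.toStr reading) =
        ((Nat.log 10 reading.natAbs : Nat) : Int) + 2 := len_neg reading hneg
    have hk9 : Nat.log 10 reading.natAbs < 10 :=
      Nat.log_lt_of_lt_pow (by omega) (by norm_num; omega)
    obtain ⟨k, hk⟩ : ∃ k, Nat.log 10 reading.natAbs = k := ⟨_, rfl⟩
    rw [hk] at hlen0 hk9
    interval_cases k
    · exact case_small reading 12 89 (by rw [glem reading _ hlen0]; decide) (by omega) (by omega)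
    · exact case_small reading 123 789 (by rw [glem reading _ hlen0]; decide) (by omega) (by omega)
    · exact case_small reading 1234 6789 (by rw [glem reading _ hlen0]; decide) (by omega) (by omega)
    · exact case_small reading 12345 56789 (by rw [glem reading _ hlen0]; decide) (by omega) (by omega)
    · exact case_small reading 123456 456789 (by rw [glem reading _ hlen0]; decide) (by omega) (by omega)
    · exact case_small reading 1234567 3456789 (by rw [glem reading _ hlen0]; decide) (by omega) (by omega)
    · exact case_small reading 12345678 23456789 (by rw [glem reading _ hlen0]; decide) (by omega) (by omega)
    · exact case_small reading 123456789 123456789 (by rw [glem reading _ hlen0]; decide) (by omega) (by omega)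
    · exact case_small reading 123456789 123456789 (by rw [glem reading _ hlen0]; decide) (by omega) (by omega)
    · exact case_small reading 123456789 123456789 (by rw [glem reading _ hlen0]; decide) (by omega) (by omega)
  · have hlenp := len_pos reading hpos
    by_cases h1 : reading < 10
    · have hlog : Nat.log 10 reading.toNat = 0 := Nat.log_of_lt (by omega)
      rw [hlog] at hlenp
      by_cases he : reading = 1
      · exact case_eq reading 1 9 (by rw [glem reading _ hlenp]; decide) he
      · exact case_small reading 1 9 (by rw [glem reading _ hlenp]; decide) he (by omega)
    by_cases h2 : reading < 100
    · have hlog : Nat.log 10 reading.toNat = 1 :=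
        Nat.log_eq_of_pow_le_of_lt_pow (by norm_num; omega) (by norm_num; omega)
      rw [hlog] at hlenp
      have hgl : getLimits reading = (12, 89) := by rw [glem reading _ hlenp]; decide
      rcases lt_trichotomy reading 12 with h | h | h
      · exact case_lt reading 12 89 10 hgl (by decide) h (by omega)
          (by intro hh; omega) (by decide)
      · exact case_eq reading 12 89 hgl h
      · exact case_gt reading 12 89 hgl (by decide) (by norm_num) h
    by_cases h3 : reading < 1000
    · have hlog : Nat.log 10 reading.toNat = 2 :=
        Nat.log_eq_of_pow_le_of_lt_pow (by norm_num; omega) (by norm_num; omega)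
      rw [hlog] at hlenp
      have hgl : getLimits reading = (123, 789) := by rw [glem reading _ hlenp]; decide
      rcases lt_trichotomy reading 123 with h | h | h
      · exact case_lt reading 123 789 100 hgl (by decide) h (by omega)
          (by decide) (by decide)
      · exact case_eq reading 123 789 hgl h
      · exact case_gt reading 123 789 hgl (by decide) (by norm_num) h
    by_cases h4 : reading < 10000
    · have hlog : Nat.log 10 reading.toNat = 3 :=
        Nat.log_eq_of_pow_le_of_lt_pow (by norm_num; omega) (by norm_num; omega)
      rw [hlog] at hlenp
      have hgl : getLimits reading = (1234, 6789) := by rw [glem reading _ hlenp]; decide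
      rcases lt_trichotomy reading 1234 with h | h | h
      · exact case_lt reading 1234 6789 1000 hgl (by decide) h (by omega)
          (by decide) (by decide)
      · exact case_eq reading 1234 6789 hgl h
      · exact case_gt reading 1234 6789 hgl (by decide) (by norm_num) h
    by_cases h5 : reading < 100000
    · have hlog : Nat.log 10 reading.toNat = 4 :=
        Nat.log_eq_of_pow_le_of_lt_pow (by norm_num; omega) (by norm_num; omega)
      rw [hlog] at hlenp
      have hgl : getLimits reading = (12345, 56789) := by rw [glem reading _ hlenp]; decide
      rcases lt_trichotomy reading 12345 with h | h | h
      · exact case_lt reading 12345 56789 10000 hgl (by decide) h (by omega)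
          (by decide) (by decide)
      · exact case_eq reading 12345 56789 hgl h
      · exact case_gt reading 12345 56789 hgl (by decide) (by norm_num) h
    by_cases h6 : reading < 1000000
    · have hlog : Nat.log 10 reading.toNat = 5 :=
        Nat.log_eq_of_pow_le_of_lt_pow (by norm_num; omega) (by norm_num; omega)
      rw [hlog] at hlenp
      have hgl : getLimits reading = (123456, 456789) := by rw [glem reading _ hlenp]; decide
      rcases lt_trichotomy reading 123456 with h | h | h
      · exact case_lt reading 123456 456789 100000 hgl (by decide) h (by omega)
          (by decide) (by decide)
      · exact case_eq reading 123456 456789 hgl h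
      · exact case_gt reading 123456 456789 hgl (by decide) (by norm_num) h
    by_cases h7 : reading < 10000000
    · have hlog : Nat.log 10 reading.toNat = 6 :=
        Nat.log_eq_of_pow_le_of_lt_pow (by norm_num; omega) (by norm_num; omega)
      rw [hlog] at hlenp
      have hgl : getLimits reading = (1234567, 3456789) := by rw [glem reading _ hlenp]; decide
      rcases lt_trichotomy reading 1234567 with h | h | h
      · exact case_lt reading 1234567 3456789 1000000 hgl (by decide) h (by omega)
          (by decide) (by decide)
      · exact case_eq reading 1234567 3456789 hgl h
      · exact case_gt reading 1234567 3456789 hgl (by decide) (by norm_num) h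
    by_cases h8 : reading < 100000000
    · have hlog : Nat.log 10 reading.toNat = 7 :=
        Nat.log_eq_of_pow_le_of_lt_pow (by norm_num; omega) (by norm_num; omega)
      rw [hlog] at hlenp
      have hgl : getLimits reading = (12345678, 23456789) := by rw [glem reading _ hlenp]; decide
      rcases lt_trichotomy reading 12345678 with h | h | h
      · exact case_lt reading 12345678 23456789 10000000 hgl (by decide) h (by omega)
          (by decide) (by decide)
      · exact case_eq reading 12345678 23456789 hgl h
      · exact case_gt reading 12345678 23456789 hgl (by decide) (by norm_num) h
    by_cases h9 : reading < 1000000000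
    · have hlog : Nat.log 10 reading.toNat = 8 :=
        Nat.log_eq_of_pow_le_of_lt_pow (by norm_num; omega) (by norm_num; omega)
      rw [hlog] at hlenp
      have hgl : getLimits reading = (123456789, 123456789) := by rw [glem reading _ hlenp]; decide
      rcases lt_trichotomy reading 123456789 with h | h | h
      · exact case_lt reading 123456789 123456789 100000000 hgl (by decide) h (by omega)
          (by decide) (by decide)
      · exact case_eq reading 123456789 123456789 hgl h
      · exact case_gt reading 123456789 123456789 hgl (by decide) (by norm_num) h
    · have hlog : Nat.log 10 reading.toNat = 9 :=
        Nat.log_eq_of_pow_le_of_lt_pow (by norm_num; omega) (by norm_num; omega)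
      rw [hlog] at hlenp
      have hgl : getLimits reading = (123456789, 123456789) := by
        rw [glem reading _ hlenp]; decide
      exact case_gt reading 123456789 123456789 hgl (by decide) (by norm_num) (by omega)
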